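-- pv_equiv track=rewrite | github.com/hannulatuomas/AI_Playground | AI Agents/DevGenius-AI/backend/server.py | extract_topics_from_messages
-- ===== SOURCE A (Python) =====
-- def extract_topics_from_messages(messages: list) -> dict:
--     """
--     Group messages by detected topics for better summarization
--     Returns dict with topic -> message indices
--     """
--     topics = {
--         'code_implementation': [],
--         'errors_and_fixes': [],
--         'requirements': [],
--         'decisions': [],
--         'general': []
--     }
--
--     for idx, msg in enumerate(messages):
--         content = msg.get('content', '').lower()
--
--         # Check for code-related content
--         if any(kw in content for kw in ['```', 'function', 'class', 'implement', 'code']):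
--             topics['code_implementation'].append(idx)
--         # Check for error-related content
--         elif any(kw in content for kw in ['error', 'bug', 'issue', 'problem', 'fix']):
--             topics['errors_and_fixes'].append(idx)
--         # Check for requirements
--         elif any(kw in content for kw in ['need', 'want', 'should', 'require', 'feature']):
--             topics['requirements'].append(idx)
--         # Check for decisions
--         elif any(kw in content for kw in ['decide', 'choose', 'select', 'approve', 'confirm']):
--             topics['decisions'].append(idx)
--         else:
--             topics['general'].append(idx)
--
--     return topics
-- ===== SOURCE B (Python) =====
-- _RULES = [
--     ('code_implementation', ['```', 'function', 'class', 'implement', 'code']),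
--     ('errors_and_fixes', ['error', 'bug', 'issue', 'problem', 'fix']),
--     ('requirements', ['need', 'want', 'should', 'require', 'feature']),
--     ('decisions', ['decide', 'choose', 'select', 'approve', 'confirm']),
-- ]
--
--
-- def _classify(msg) -> str:
--     content = msg.get('content', '').lower()
--     return next((name for name, kws in _RULES if any(kw in content for kw in kws)),
--                 'general')
--
--
-- def extract_topics_from_messages(messages: list) -> dict:
--     labels = [_classify(msg) for msg in messages]
--     return {name: [idx for idx, lab in enumerate(labels) if lab == name]
--             for name in [n for n, _ in _RULES] + ['general']}
-- ===== Notes on version B (the rewrite author's own statement) =====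
-- stated objective: idiomatic
-- what changed: A threads one dict through an enumerate loop with a five-way elif chain mutating a bucket per message; B is label-then-group: a rule table drives a first-match classifier producing a label list, and the result dict is built per topic by a comprehension over the enumerated labels.
import Mathlib
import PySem

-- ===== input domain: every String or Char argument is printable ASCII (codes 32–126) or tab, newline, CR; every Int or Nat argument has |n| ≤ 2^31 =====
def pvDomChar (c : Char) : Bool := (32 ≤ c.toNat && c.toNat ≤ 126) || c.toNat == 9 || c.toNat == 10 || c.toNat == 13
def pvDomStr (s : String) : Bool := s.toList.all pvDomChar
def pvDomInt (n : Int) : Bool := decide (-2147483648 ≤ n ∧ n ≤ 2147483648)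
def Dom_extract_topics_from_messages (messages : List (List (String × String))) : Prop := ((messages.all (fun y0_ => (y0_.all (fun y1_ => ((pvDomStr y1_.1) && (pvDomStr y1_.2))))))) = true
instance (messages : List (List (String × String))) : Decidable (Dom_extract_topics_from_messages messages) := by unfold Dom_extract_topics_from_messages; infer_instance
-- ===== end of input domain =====

-- B re-implements A's enumerate loop + five-way elif chain as a rule-table classifier
-- followed by per-topic grouping comprehensions (idiomatic label-then-group); same values, same cost.

-- ===== PORT A =====
def extract_topics_from_messages (messages : List (List (String × String))) : List (String × List Int) :=
  let topics : PySem.Dict String (List Int) := PySem.Dict.mk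
    [("code_implementation", []), ("errors_and_fixes", []), ("requirements", []),
     ("decisions", []), ("general", [])]
  let final := (PySem.List.enumerate messages).foldl
    (fun topics p =>
      let idx := p.1
      let msg := p.2
      let content := PySem.Str.lower ((PySem.Dict.mk msg).getD "content" "")
      if ["```", "function", "class", "implement", "code"].any (fun kw => PySem.Str.isIn kw content) then
        topics.modify "code_implementation" [] (· ++ [idx])
      else if ["error", "bug", "issue", "problem", "fix"].any (fun kw => PySem.Str.isIn kw content) then
        topics.modify "errors_and_fixes" [] (· ++ [idx])
      else if ["need", "want", "should", "require", "feature"].any (fun kw => PySem.Str.isIn kw content) then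
        topics.modify "requirements" [] (· ++ [idx])
      else if ["decide", "choose", "select", "approve", "confirm"].any (fun kw => PySem.Str.isIn kw content) then
        topics.modify "decisions" [] (· ++ [idx])
      else
        topics.modify "general" [] (· ++ [idx]))
    topics
  final.items

-- ===== PORT B =====
def pvRules : List (String × List String) :=
  [("code_implementation", ["```", "function", "class", "implement", "code"]),
   ("errors_and_fixes", ["error", "bug", "issue", "problem", "fix"]),
   ("requirements", ["need", "want", "should", "require", "feature"]),
   ("decisions", ["decide", "choose", "select", "approve", "confirm"])]

def pvClassify (msg : List (String × String)) : String :=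
  let content := PySem.Str.lower ((PySem.Dict.mk msg).getD "content" "")
  match pvRules.find? (fun r => r.2.any (fun kw => PySem.Str.isIn kw content)) with
  | some r => r.1
  | none => "general"

def extract_topics_from_messages_alt (messages : List (List (String × String))) : List (String × List Int) :=
  let labels := messages.map pvClassify
  (pvRules.map (·.1) ++ ["general"]).map (fun name =>
    (name, ((PySem.List.enumerate labels).filter (fun p => p.2 == name)).map (·.1)))

-- ===== PRECONDITION & SPEC =====
def Spec_extract_topics_from_messages (messages : List (List (String × String))) (out : List (String × List Int)) : Prop := out = extract_topics_from_messages_alt messages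
instance (messages : List (List (String × String))) (out : List (String × List Int)) : Decidable (Spec_extract_topics_from_messages messages out) := by unfold Spec_extract_topics_from_messages; infer_instance

-- ===== CLAIM (what is proved, stated in full; the proofs are below) =====
def Claim_equal_extract_topics_from_messages : Prop := ∀ (messages : List (List (String × String))), Dom_extract_topics_from_messages messages → Spec_extract_topics_from_messages messages (extract_topics_from_messages messages)

-- ===== LEMMAS AND PROOFS =====

-- A's per-message step, named for the proofs (definitionally the lambda inside A's fold)
def pvStepA (topics : PySem.Dict String (List Int)) (p : Int × List (String × String)) : PySem.Dict String (List Int) :=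
  let idx := p.1
  let msg := p.2
  let content := PySem.Str.lower ((PySem.Dict.mk msg).getD "content" "")
  if ["```", "function", "class", "implement", "code"].any (fun kw => PySem.Str.isIn kw content) then
    topics.modify "code_implementation" [] (· ++ [idx])
  else if ["error", "bug", "issue", "problem", "fix"].any (fun kw => PySem.Str.isIn kw content) then
    topics.modify "errors_and_fixes" [] (· ++ [idx])
  else if ["need", "want", "should", "require", "feature"].any (fun kw => PySem.Str.isIn kw content) then
    topics.modify "requirements" [] (· ++ [idx])
  else if ["decide", "choose", "select", "approve", "confirm"].any (fun kw => PySem.Str.isIn kw content) then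
    topics.modify "decisions" [] (· ++ [idx])
  else
    topics.modify "general" [] (· ++ [idx])

-- indices (from start s) of the messages of ms that classify to `name`
def pvSel (ms : List (List (String × String))) (s : Int) (name : String) : List Int :=
  ((PySem.List.enumerate ms s).filter (fun p => pvClassify p.2 == name)).map (·.1)

lemma classify_chain (msg : List (String × String)) :
    pvClassify msg =
      (let content := PySem.Str.lower ((PySem.Dict.mk msg).getD "content" "")
       if ["```", "function", "class", "implement", "code"].any (fun kw => PySem.Str.isIn kw content) then "code_implementation"
       else if ["error", "bug", "issue", "problem", "fix"].any (fun kw => PySem.Str.isIn kw content) then "errors_and_fixes"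
       else if ["need", "want", "should", "require", "feature"].any (fun kw => PySem.Str.isIn kw content) then "requirements"
       else if ["decide", "choose", "select", "approve", "confirm"].any (fun kw => PySem.Str.isIn kw content) then "decisions"
       else "general") := by
  unfold pvClassify pvRules
  simp only [List.find?]
  set content := PySem.Str.lower ((PySem.Dict.mk msg).getD "content" "") with hc
  cases h1 : List.any ["```", "function", "class", "implement", "code"] (fun kw => PySem.Str.isIn kw content) <;>
  cases h2 : List.any ["error", "bug", "issue", "problem", "fix"] (fun kw => PySem.Str.isIn kw content) <;>
  cases h3 : List.any ["need", "want", "should", "require", "feature"] (fun kw => PySem.Str.isIn kw content) <;>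
  cases h4 : List.any ["decide", "choose", "select", "approve", "confirm"] (fun kw => PySem.Str.isIn kw content) <;>
  simp only [h1, h2, h3, h4] <;> rfl

lemma stepA_eq (d : PySem.Dict String (List Int)) (p : Int × List (String × String)) :
    pvStepA d p = d.modify (pvClassify p.2) [] (· ++ [p.1]) := by
  rw [classify_chain]
  unfold pvStepA
  dsimp only
  split_ifs <;> rfl

lemma classify_mem (m : List (String × String)) :
    pvClassify m ∈ ["code_implementation", "errors_and_fixes", "requirements", "decisions", "general"] := by
  rw [classify_chain]
  dsimp only
  split_ifs <;> simp

lemma modify_lit (a b c d e : List Int) (k : String)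
    (hk : k ∈ ["code_implementation", "errors_and_fixes", "requirements", "decisions", "general"])
    (f : List Int → List Int) :
    (PySem.Dict.mk [("code_implementation", a), ("errors_and_fixes", b), ("requirements", c), ("decisions", d), ("general", e)]).modify k [] f =
    PySem.Dict.mk [("code_implementation", if k = "code_implementation" then f a else a),
                   ("errors_and_fixes", if k = "errors_and_fixes" then f b else b),
                   ("requirements", if k = "requirements" then f c else c),
                   ("decisions", if k = "decisions" then f d else d),
                   ("general", if k = "general" then f e else e)] := by
  fin_cases hk <;>
    simp [PySem.Dict.modify, PySem.Dict.insert, PySem.Dict.getD, PySem.Dict.get?, PySem.Dict.contains]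

lemma sel_cons (m : List (String × String)) (ms : List (List (String × String))) (s : Int) (name : String) :
    pvSel (m :: ms) s name = (if pvClassify m = name then [s] else []) ++ pvSel ms (s + 1) name := by
  unfold pvSel
  rw [PySem.List.enumerate_cons]
  by_cases h : pvClassify m = name <;> simp [h]

lemma loopA (ms : List (List (String × String))) :
    ∀ (s : Int) (a b c d e : List Int),
      (PySem.List.enumerate ms s).foldl pvStepA
        (PySem.Dict.mk [("code_implementation", a), ("errors_and_fixes", b), ("requirements", c), ("decisions", d), ("general", e)]) =
      PySem.Dict.mk [("code_implementation", a ++ pvSel ms s "code_implementation"),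
                     ("errors_and_fixes", b ++ pvSel ms s "errors_and_fixes"),
                     ("requirements", c ++ pvSel ms s "requirements"),
                     ("decisions", d ++ pvSel ms s "decisions"),
                     ("general", e ++ pvSel ms s "general")] := by
  induction ms with
  | nil =>
    intro s a b c d e
    simp [pvSel, PySem.List.enumerate_nil]
  | cons m ms ih =>
    intro s a b c d e
    rw [PySem.List.enumerate_cons]
    simp only [List.foldl_cons]
    rw [stepA_eq, modify_lit _ _ _ _ _ _ (classify_mem m), ih]
    refine congrArg PySem.Dict.mk ?_
    simp only [sel_cons]
    split_ifs <;> simp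

lemma enumerate_map_classify (ms : List (List (String × String))) :
    ∀ (s : Int) (name : String),
      ((PySem.List.enumerate (ms.map pvClassify) s).filter (fun p => p.2 == name)).map (·.1) =
        pvSel ms s name := by
  induction ms with
  | nil => intro s name; simp [pvSel, PySem.List.enumerate_nil]
  | cons m ms ih =>
    intro s name
    simp only [List.map_cons]
    rw [PySem.List.enumerate_cons, sel_cons]
    by_cases h : pvClassify m = name <;> simp [h, ih]

-- ===== VERDICT (by name: the statement is the Claim_ definition above) =====
theorem extract_topics_from_messages_spec : Claim_equal_extract_topics_from_messages := by
  intro messages _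
  unfold Spec_extract_topics_from_messages
  show extract_topics_from_messages messages = extract_topics_from_messages_alt messages
  have hA : extract_topics_from_messages messages =
      ((PySem.List.enumerate messages).foldl pvStepA
        (PySem.Dict.mk [("code_implementation", []), ("errors_and_fixes", []), ("requirements", []),
                        ("decisions", []), ("general", [])])).items := rfl
  rw [hA, loopA]
  unfold extract_topics_from_messages_alt pvRules
  simp only [List.map_cons, List.map_nil, List.cons_append, List.nil_append]
  rw [enumerate_map_classify, enumerate_map_classify, enumerate_map_classify,
      enumerate_map_classify, enumerate_map_classify]
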